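-- pv_equiv track=rewrite | github.com/nalalalan/relay-app | backend/app/services/buyer_acquisition_loop_v1.py | _prefer_contact_email
-- ===== SOURCE A (Python) =====
-- def _prefer_contact_email(emails: list[str], domain: str) -> str:
--     if not emails:
--         return ""
--     prioritized_prefixes = ["founder@", "owner@", "hello@", "alan@", "contact@", "info@"]
--     for prefix in prioritized_prefixes:
--         for email in emails:
--             if email.startswith(prefix):
--                 return email
--     for email in emails:
--         if domain and email.endswith(f"@{domain}"):
--             return email
--     return emails[0]
-- ===== SOURCE B (Python) =====
-- def _prefer_contact_email(emails: list[str], domain: str) -> str: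
--     if not emails:
--         return ""
--     prefixes = ["founder@", "owner@", "hello@", "alan@", "contact@", "info@"]
--
--     def score(email: str) -> int:
--         return next((i for i, p in enumerate(prefixes) if email.startswith(p)),
--                     len(prefixes))
--
--     best = min(emails, key=score)
--     if score(best) < len(prefixes):
--         return best
--     if domain:
--         suffix = "@" + domain
--         for email in emails:
--             if email.endswith(suffix):
--                 return email
--     return emails[0]
-- ===== Notes on version B (the rewrite author's own statement) =====
-- stated objective: alternative
-- what changed: Replaces A's prefix-outer nested scan (one pass over emails per prioritized prefix) with a per-email priority score (index of first matching prefix) and a single min(emails, key=score) pass that keeps the first list-order email on ties, falling back to the domain-suffix scan only when no prefix matched.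
import Mathlib
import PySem

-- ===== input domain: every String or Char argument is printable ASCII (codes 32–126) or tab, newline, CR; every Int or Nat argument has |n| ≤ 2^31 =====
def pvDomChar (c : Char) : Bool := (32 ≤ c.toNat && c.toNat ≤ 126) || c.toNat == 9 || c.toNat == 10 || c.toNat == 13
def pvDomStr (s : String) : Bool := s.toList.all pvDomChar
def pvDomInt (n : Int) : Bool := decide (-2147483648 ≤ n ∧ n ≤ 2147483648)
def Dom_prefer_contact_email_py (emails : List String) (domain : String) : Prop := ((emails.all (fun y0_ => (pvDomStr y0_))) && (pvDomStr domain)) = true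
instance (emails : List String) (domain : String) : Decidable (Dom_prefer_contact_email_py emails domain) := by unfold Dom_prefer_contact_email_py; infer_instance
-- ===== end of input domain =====

-- ===== PORT A =====
-- B replaces A's prefix-outer nested scan with per-email priority scores and one min-by pass over the emails (a timing run measured B faster).

def pvAInner (pre : String) : List String → Option String
  | [] => none
  | e :: es => if PySem.Str.startswith e pre then some e else pvAInner pre es

def pvAOuter (emails : List String) : List String → Option String
  | [] => none
  | p :: ps =>
    match pvAInner p emails with
    | some e => some e
    | none => pvAOuter emails ps

def pvADomain (domain : String) : List String → Option String
  | [] => none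
  | e :: es =>
    if (domain != "") && PySem.Str.endswith e ("@" ++ domain) then some e
    else pvADomain domain es

def prefer_contact_email_py (emails : List String) (domain : String) : String :=
  match emails with
  | [] => ""
  | e0 :: _ =>
    let prefixes := ["founder@", "owner@", "hello@", "alan@", "contact@", "info@"]
    match pvAOuter emails prefixes with
    | some e => e
    | none =>
      match pvADomain domain emails with
      | some e => e
      | none => e0

-- ===== PORT B =====
-- score(email) = index of the first prioritized prefix it starts with, else len(prefixes)
def pvScore (prefixes : List String) (e : String) : Nat :=
  match List.findIdx? (fun p => PySem.Str.startswith e p) prefixes with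
  | some i => i
  | none => prefixes.length

-- min(emails, key=f): Python's min keeps the first element on ties (strict update only)
def pvMinKey (f : String → Nat) : String → List String → String
  | best, [] => best
  | best, e :: es => if f e < f best then pvMinKey f e es else pvMinKey f best es

def pvBDomain (suffix : String) : List String → Option String
  | [] => none
  | e :: es => if PySem.Str.endswith e suffix then some e else pvBDomain suffix es

def prefer_contact_email_py_alt (emails : List String) (domain : String) : String :=
  match emails with
  | [] => ""
  | e0 :: rest =>
    let prefixes := ["founder@", "owner@", "hello@", "alan@", "contact@", "info@"]
    let best := pvMinKey (pvScore prefixes) e0 rest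
    if pvScore prefixes best < prefixes.length then best
    else
      let scan := if domain != "" then pvBDomain ("@" ++ domain) emails else none
      match scan with
      | some e => e
      | none => e0

-- ===== PRECONDITION & SPEC =====
def Spec_prefer_contact_email_py (emails : List String) (domain : String) (out : String) : Prop := out = prefer_contact_email_py_alt emails domain
instance (emails : List String) (domain : String) (out : String) : Decidable (Spec_prefer_contact_email_py emails domain out) := by unfold Spec_prefer_contact_email_py; infer_instance

-- ===== CLAIM (what is proved, stated in full; the proofs are below) =====
def Claim_equal_prefer_contact_email_py : Prop := ∀ (emails : List String) (domain : String), Dom_prefer_contact_email_py emails domain → Spec_prefer_contact_email_py emails domain (prefer_contact_email_py emails domain)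

-- ===== LEMMAS AND PROOFS =====

theorem pvMinKey_cons (f : String → Nat) (best e : String) (es : List String) :
    pvMinKey f best (e :: es) =
      if f e < f best then pvMinKey f e es else pvMinKey f best es := rfl

theorem pvAInner_cons (p e : String) (es : List String) :
    pvAInner p (e :: es) =
      if PySem.Str.startswith e p then some e else pvAInner p es := rfl

theorem score_cons (p : String) (ps : List String) (e : String) :
    pvScore (p :: ps) e =
      if PySem.Str.startswith e p then 0 else pvScore ps e + 1 := by
  unfold pvScore
  rw [List.findIdx?_cons]
  cases h : PySem.Str.startswith e p
  · cases List.findIdx? (fun q => PySem.Str.startswith e q) ps <;> simp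
  · simp

theorem minKey_zero (f : String → Nat) (best : String) (h : f best = 0) :
    ∀ l, pvMinKey f best l = best := by
  intro l; induction l with
  | nil => rfl
  | cons e es ih => rw [pvMinKey_cons, if_neg (by omega)]; exact ih

theorem minKey_first (f : String → Nat) :
    ∀ (l : List String) (best z : String),
      List.find? (fun y => f y == 0) (best :: l) = some z →
      pvMinKey f best l = z := by
  intro l
  induction l with
  | nil =>
    intro best z h
    by_cases hb : f best = 0
    · rw [List.find?_cons_of_pos (by simpa using hb)] at h
      cases h; rfl
    · rw [List.find?_cons_of_neg (by simpa using hb), List.find?_nil] at h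
      cases h
  | cons e es ih =>
    intro best z h
    by_cases hb : f best = 0
    · rw [List.find?_cons_of_pos (by simpa using hb)] at h
      cases h
      rw [pvMinKey_cons, if_neg (by omega)]
      exact minKey_zero f best hb es
    · rw [List.find?_cons_of_neg (by simpa using hb)] at h
      by_cases he : f e = 0
      · rw [List.find?_cons_of_pos (by simpa using he)] at h
        cases h
        rw [pvMinKey_cons, if_pos (by omega)]
        exact minKey_zero f e he es
      · by_cases hlt : f e < f best
        · rw [pvMinKey_cons, if_pos hlt]
          exact ih e z h
        · rw [pvMinKey_cons, if_neg hlt]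
          apply ih best z
          rw [List.find?_cons_of_neg (by simpa using hb)]
          rw [List.find?_cons_of_neg (by simpa using he)] at h
          exact h

theorem minKey_congr (f g : String → Nat) :
    ∀ (l : List String) (best : String),
      (∀ x ∈ best :: l, f x = g x + 1) →
      pvMinKey f best l = pvMinKey g best l := by
  intro l
  induction l with
  | nil => intro best _; rfl
  | cons e es ih =>
    intro best hfg
    have hb := hfg best (by simp)
    have he := hfg e (by simp)
    have htail : ∀ (b : String), b = best ∨ b = e →
        (∀ x ∈ b :: es, f x = g x + 1) := by
      rintro b (rfl | rfl) x hx <;>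
        (rcases List.mem_cons.mp hx with rfl | hx)
      · exact hb
      · exact hfg x (by simp [hx])
      · exact he
      · exact hfg x (by simp [hx])
    by_cases hlt : g e < g best
    · rw [pvMinKey_cons, pvMinKey_cons, if_pos hlt, if_pos (by omega)]
      exact ih e (htail e (Or.inr rfl))
    · rw [pvMinKey_cons, pvMinKey_cons, if_neg hlt, if_neg (by omega)]
      exact ih best (htail best (Or.inl rfl))

theorem minKey_mem (f : String → Nat) :
    ∀ (l : List String) (best : String), pvMinKey f best l ∈ best :: l := by
  intro l
  induction l with
  | nil => intro best; simp [pvMinKey]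
  | cons e es ih =>
    intro best
    rw [pvMinKey_cons]
    by_cases hlt : f e < f best
    · rw [if_pos hlt]
      rcases List.mem_cons.mp (ih e) with h | h
      · simp [h]
      · simp [h]
    · rw [if_neg hlt]
      rcases List.mem_cons.mp (ih best) with h | h
      · simp [h]
      · simp [h]

theorem inner_eq_find (p : String) :
    ∀ l, pvAInner p l = List.find? (fun y => PySem.Str.startswith y p) l := by
  intro l; induction l with
  | nil => rfl
  | cons e es ih =>
    rw [pvAInner_cons, ih]
    cases h : PySem.Str.startswith e p
    · rw [List.find?_cons_of_neg (by simpa using h)]; simp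
    · rw [List.find?_cons_of_pos (by simpa using h)]; simp

theorem score_eq_zero_iff (p : String) (ps : List String) (y : String) :
    (pvScore (p :: ps) y == 0) = PySem.Str.startswith y p := by
  rw [score_cons]
  cases h : PySem.Str.startswith y p <;> simp

theorem core (ps : List String) :
    ∀ (e : String) (es : List String),
      pvAOuter (e :: es) ps =
        (if pvScore ps (pvMinKey (pvScore ps) e es) < ps.length
         then some (pvMinKey (pvScore ps) e es) else none) := by
  induction ps with
  | nil =>
    intro e es
    simp [pvAOuter, pvScore]
  | cons p ps ih =>
    intro e es
    cases hin : pvAInner p (e :: es) with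
    | some x =>
      have hfind : List.find? (fun y => pvScore (p :: ps) y == 0) (e :: es) = some x := by
        rw [funext (score_eq_zero_iff p ps), ← inner_eq_find]
        exact hin
      have hmk := minKey_first (pvScore (p :: ps)) es e x hfind
      have hx0 : pvScore (p :: ps) x = 0 := by
        have := List.find?_some hfind
        simpa using this
      show (match pvAInner p (e :: es) with
            | some e => some e
            | none => pvAOuter (e :: es) ps) = _
      rw [hin, hmk, hx0, List.length_cons, if_pos (by omega)]
    | none =>
      have hall : ∀ y ∈ e :: es, PySem.Str.startswith y p = false := by
        intro y hy
        have h' := inner_eq_find p (e :: es)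
        rw [hin] at h'
        simpa using List.find?_eq_none.mp h'.symm y hy
      have hshift : ∀ x ∈ e :: es, pvScore (p :: ps) x = pvScore ps x + 1 := by
        intro x hx; rw [score_cons, hall x hx]; simp
      have hmk : pvMinKey (pvScore (p :: ps)) e es = pvMinKey (pvScore ps) e es :=
        minKey_congr _ _ es e hshift
      have hmem := minKey_mem (pvScore ps) es e
      have hsb : pvScore (p :: ps) (pvMinKey (pvScore ps) e es)
          = pvScore ps (pvMinKey (pvScore ps) e es) + 1 := hshift _ hmem
      show (match pvAInner p (e :: es) with
            | some e => some e
            | none => pvAOuter (e :: es) ps) = _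
      rw [hin, ih e es, hmk, hsb, List.length_cons]
      by_cases hc : pvScore ps (pvMinKey (pvScore ps) e es) < ps.length
      · rw [if_pos hc, if_pos (by omega)]
      · rw [if_neg hc, if_neg (by omega)]

theorem domain_eq (domain : String) :
    ∀ l, pvADomain domain l =
      (if domain != "" then pvBDomain ("@" ++ domain) l else none) := by
  intro l
  induction l with
  | nil => cases h : (domain != "") <;> simp [pvADomain, pvBDomain]
  | cons e es ih =>
    cases h : (domain != "") with
    | false => simp [pvADomain, h, ih]
    | true =>
      cases he : PySem.Str.endswith e ("@" ++ domain) <;>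
        simp [pvADomain, pvBDomain, h, ih]

-- ===== VERDICT (by name: the statement is the Claim_ definition above) =====
theorem prefer_contact_email_py_spec : Claim_equal_prefer_contact_email_py := by
  intro emails domain _
  unfold Spec_prefer_contact_email_py
  cases emails with
  | nil => rfl
  | cons e0 rest =>
    simp only [prefer_contact_email_py, prefer_contact_email_py_alt]
    rw [core]
    by_cases hc : pvScore ["founder@", "owner@", "hello@", "alan@", "contact@", "info@"]
        (pvMinKey (pvScore ["founder@", "owner@", "hello@", "alan@", "contact@", "info@"]) e0 rest)
        < (["founder@", "owner@", "hello@", "alan@", "contact@", "info@"] : List String).length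
    · rw [if_pos hc, if_pos hc]
    · rw [if_neg hc, if_neg hc, domain_eq domain (e0 :: rest)]
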